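-- pv_equiv track=rewrite | github.com/cisco-open/polygraphLLM | src/polygraphLLM/algorithms/uncertainty/utils/utils.py | truncate_after_last_print
-- ===== SOURCE A (Python) =====
-- def truncate_after_last_print(code_str):
--     # Split the code into lines
--     lines = code_str.strip().splitlines()
--     if len(lines) == 0:
--         return ''
--
--     # Check if the last line contains a print statement
--     if lines[-1].strip().startswith("print"):
--         return code_str.strip()
--
--     # If not, truncate the code after the last print statement
--     for i in range(len(lines) - 1, -1, -1):
--         if lines[i].strip().startswith("print"):
--             return '\n'.join(lines[:i+1])
--
--     # If there's no print statement at all, return the original code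
--     return code_str.strip()
-- ===== SOURCE B (Python) =====
-- def truncate_after_last_print(code_str):
--     s = code_str.strip()
--     # Stream the lines once, building the truncated output as we go:
--     # `kept` holds the lines up to and including the last print line seen so far,
--     # `pending` buffers the lines after it.
--     kept = None
--     pending = []
--     for line in s.splitlines():
--         if line.strip().startswith("print"):
--             kept = (kept if kept is not None else []) + pending + [line]
--             pending = []
--         else:
--             pending.append(line)
--     if kept is None or not pending:
--         return s
--     return '\n'.join(kept)
-- ===== Notes on version B (the rewrite author's own statement) =====
-- stated objective: alternative
-- what changed: Replaces A's up-front last-line check plus backward early-return index scan over range(len-1,-1,-1) with slicing and joining at an index, by a single forward streaming pass that builds the truncated output as it goes, maintaining the kept lines and a pending buffer of lines seen after the last print line.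
import Mathlib
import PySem

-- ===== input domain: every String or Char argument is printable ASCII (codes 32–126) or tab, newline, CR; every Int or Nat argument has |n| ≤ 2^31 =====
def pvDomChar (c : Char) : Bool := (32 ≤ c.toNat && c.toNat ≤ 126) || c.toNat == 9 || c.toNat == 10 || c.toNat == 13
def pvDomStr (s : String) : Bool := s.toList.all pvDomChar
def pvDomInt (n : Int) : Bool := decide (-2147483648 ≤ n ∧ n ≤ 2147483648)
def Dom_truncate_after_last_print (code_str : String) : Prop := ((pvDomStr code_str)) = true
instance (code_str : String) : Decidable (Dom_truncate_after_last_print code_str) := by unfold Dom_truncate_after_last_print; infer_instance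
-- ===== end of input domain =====

-- B replaces A's up-front last-line check plus backward index scan over range(len-1,-1,-1)
-- with one forward streaming pass over the lines that builds the truncated output as it goes,
-- maintaining the kept lines and a pending buffer of lines after the last print (objective: alternative).

-- ===== PORT A =====
-- the backward 'for i in range(len(lines)-1, -1, -1)' loop with its early return
def pvAScan (lines : List String) : List Int → Option String
  | [] => none
  | i :: rest =>
    if PySem.Str.startswith (PySem.Str.strip (PySem.List.pyGetD lines i "")) "print" then
      some (PySem.Str.join "\n" (PySem.List.slice lines none (some (i + 1))))
    else pvAScan lines rest

def truncate_after_last_print (code_str : String) : String :=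
  let lines := PySem.Str.splitlines (PySem.Str.strip code_str)
  if lines.length = 0 then ""
  else if PySem.Str.startswith (PySem.Str.strip ((PySem.List.pyGet? lines (-1)).getD "")) "print" then
    PySem.Str.strip code_str
  else
    match pvAScan lines (PySem.List.pyRange ((lines.length : Int) - 1) (-1) (-1)) with
    | some r => r
    | none => PySem.Str.strip code_str

-- ===== PORT B =====
-- one step of Source B's for-loop over the lines: state = (kept, pending)
def pvBStep (st : Option (List String) × List String) (line : String) : Option (List String) × List String :=
  if PySem.Str.startswith (PySem.Str.strip line) "print" then
    (some ((st.1.getD []) ++ st.2 ++ [line]), [])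
  else (st.1, st.2 ++ [line])

def truncate_after_last_print_alt (code_str : String) : String :=
  let s := PySem.Str.strip code_str
  match (PySem.Str.splitlines s).foldl pvBStep (none, []) with
  | (none, _) => s
  | (some _, []) => s
  | (some kept, _ :: _) => PySem.Str.join "\n" kept

-- ===== PRECONDITION & SPEC =====
def Spec_truncate_after_last_print (code_str : String) (out : String) : Prop := out = truncate_after_last_print_alt code_str
instance (code_str : String) (out : String) : Decidable (Spec_truncate_after_last_print code_str out) := by unfold Spec_truncate_after_last_print; infer_instance

-- ===== CLAIM (what is proved, stated in full; the proofs are below) =====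
def Claim_equal_truncate_after_last_print : Prop := ∀ (code_str : String), Dom_truncate_after_last_print code_str → Spec_truncate_after_last_print code_str (truncate_after_last_print code_str)

-- ===== LEMMAS AND PROOFS =====

-- the predicate both programs test on a line
def pvPredL (l : String) : Bool := PySem.Str.startswith (PySem.Str.strip l) "print"

-- indexed form used by A's scan
def pvPred (lines : List String) (i : Int) : Bool := pvPredL (PySem.List.pyGetD lines i "")

-- reference split: some (lines up to and including the LAST print line, lines after it), none if no print line
def pvChop : List String → Option (List String × List String)
  | [] => none
  | x :: xs =>
    match pvChop xs with
    | some (a, b) => some (x :: a, b)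
    | none => if pvPredL x then some ([x], xs) else none

theorem pvChop_none {lines : List String} (h : pvChop lines = none) :
    ∀ y ∈ lines, pvPredL y = false := by
  induction lines with
  | nil => simp
  | cons x xs ih =>
    rw [pvChop] at h
    cases hc : pvChop xs with
    | some ab => rw [hc] at h; simp at h
    | none =>
      rw [hc] at h
      by_cases hp : pvPredL x = true
      · simp [hp] at h
      · intro y hy
        rcases List.mem_cons.mp hy with rfl | hy
        · simpa using hp
        · exact ih hc y hy

theorem pvChop_some {lines a b : List String} (h : pvChop lines = some (a, b)) :
    lines = a ++ b ∧ (∃ a' al, a = a' ++ [al] ∧ pvPredL al = true) ∧ (∀ y ∈ b, pvPredL y = false) := by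
  induction lines generalizing a b with
  | nil => simp [pvChop] at h
  | cons x xs ih =>
    rw [pvChop] at h
    cases hc : pvChop xs with
    | some ab =>
      rw [hc] at h
      obtain ⟨a0, b0⟩ := ab
      simp only [Option.some.injEq, Prod.mk.injEq] at h
      obtain ⟨rfl, rfl⟩ := h
      obtain ⟨h1, ⟨a', al, rfl, hal⟩, h3⟩ := ih hc
      exact ⟨by simp [h1], ⟨x :: a', al, by simp, hal⟩, h3⟩
    | none =>
      rw [hc] at h
      by_cases hp : pvPredL x = true
      · rw [if_pos hp] at h
        simp only [Option.some.injEq, Prod.mk.injEq] at h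
        obtain ⟨rfl, rfl⟩ := h
        exact ⟨rfl, ⟨[], x, rfl, hp⟩, pvChop_none hc⟩
      · simp [hp] at h

-- pvChop after appending one line
theorem pvChop_append (xs : List String) (x : String) :
    pvChop (xs ++ [x]) =
      if pvPredL x then some (xs ++ [x], [])
      else (pvChop xs).map (fun ab => (ab.1, ab.2 ++ [x])) := by
  induction xs with
  | nil => by_cases hp : pvPredL x = true <;> simp [pvChop, hp]
  | cons y ys ih =>
    rw [List.cons_append, pvChop, ih]
    by_cases hp : pvPredL x = true
    · simp [hp]
    · rw [if_neg hp, if_neg hp, pvChop]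
      cases hc : pvChop ys with
      | some ab => simp
      | none => by_cases hy : pvPredL y = true <;> simp [hy]

-- B's fold in terms of pvChop
theorem pvFoldB (xs : List String) (k : Option (List String)) (p : List String) :
    xs.foldl pvBStep (k, p) =
      match pvChop xs with
      | none => (k, p ++ xs)
      | some (a, b) => (some (k.getD [] ++ p ++ a), b) := by
  induction xs generalizing k p with
  | nil => simp [pvChop]
  | cons x xs ih =>
    rw [List.foldl_cons, pvChop]
    by_cases hp : pvPredL x = true
    · have : pvBStep (k, p) x = (some (k.getD [] ++ p ++ [x]), []) := by
        simp [pvBStep, pvPredL] at hp ⊢; simp [hp]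
      rw [this, ih]
      cases hc : pvChop xs with
      | none => simp [hp]
      | some ab => obtain ⟨a, b⟩ := ab; simp
    · have : pvBStep (k, p) x = (k, p ++ [x]) := by
        simp [pvBStep, pvPredL] at hp ⊢; simp [hp]
      rw [this, ih]
      cases hc : pvChop xs with
      | none => simp [hp]
      | some ab => obtain ⟨a, b⟩ := ab; simp

-- A's scan returns the joined prefix at the first matching index of its index list
theorem pvAScan_eq_find (lines : List String) (is : List Int) :
    pvAScan lines is =
      (is.find? (pvPred lines)).map
        (fun i => PySem.Str.join "\n" (PySem.List.slice lines none (some (i + 1)))) := by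
  induction is with
  | nil => rfl
  | cons i rest ih =>
    rw [pvAScan]
    by_cases h : pvPred lines i = true
    · rw [if_pos (by simpa [pvPred, pvPredL] using h), List.find?_cons_of_pos h]; rfl
    · rw [if_neg (by simpa [pvPred, pvPredL] using h), List.find?_cons_of_neg h, ih]

-- find? agrees on lists with pointwise-equal predicates
theorem pvFind?_congr {α : Type} (p q : α → Bool) (xs : List α) (h : ∀ a ∈ xs, p a = q a) :
    xs.find? p = xs.find? q := by
  induction xs with
  | nil => rfl
  | cons x xs ih =>
    have hx := h x (by simp)
    by_cases hp : p x = true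
    · rw [List.find?_cons_of_pos hp, List.find?_cons_of_pos (hx ▸ hp)]
    · rw [List.find?_cons_of_neg hp,
        List.find?_cons_of_neg (by rw [← hx]; exact hp),
        ih (fun a ha => h a (by simp [ha]))]

-- pvPred on an appended list, at the new last index and below it
theorem pvPred_append_last (xs : List String) (x : String) :
    pvPred (xs ++ [x]) (xs.length : Int) = pvPredL x := by
  rw [pvPred, PySem.List.pyGetD_natCast]
  simp

theorem pvPred_append_lt (xs : List String) (x : String) (i : Int)
    (h0 : 0 ≤ i) (h1 : i < (xs.length : Int)) :
    pvPred (xs ++ [x]) i = pvPred xs i := by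
  rw [pvPred, pvPred, PySem.List.pyGetD_eq_getElem _ _ h0 (by simp; omega),
    PySem.List.pyGetD_eq_getElem _ _ h0 (by exact_mod_cast h1)]
  congr 1
  exact List.getElem_append_left (by omega)

-- find? of the last matching index over the reversed index range, in terms of pvChop
theorem pvFind_chop (lines : List String) :
    (PySem.List.pyRange 0 (lines.length : Int) 1).reverse.find? (pvPred lines) =
      (pvChop lines).map (fun ab => ((ab.1.length : Int) - 1)) := by
  induction lines using List.reverseRecOn with
  | nil => simp [pvChop, PySem.List.pyRange]
  | append_singleton xs x ih =>
    have hlen : ((xs ++ [x]).length : Int) = (xs.length : Int) + 1 := by simp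
    rw [hlen, PySem.List.pyRange_one_succ_right (by positivity), List.reverse_append,
      List.reverse_singleton, List.singleton_append, pvChop_append]
    have hlast := pvPred_append_last xs x
    by_cases hp : pvPredL x = true
    · rw [List.find?_cons_of_pos (by rw [hlast]; exact hp), if_pos hp]
      simp
    · rw [List.find?_cons_of_neg (by rw [hlast]; simpa using hp), if_neg hp]
      have hcongr : (PySem.List.pyRange 0 (xs.length : Int) 1).reverse.find? (pvPred (xs ++ [x]))
          = (PySem.List.pyRange 0 (xs.length : Int) 1).reverse.find? (pvPred xs) := by
        apply pvFind?_congr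
        intro i hi
        rw [List.mem_reverse, PySem.List.mem_pyRange_one] at hi
        exact pvPred_append_lt xs x i hi.1 hi.2
      rw [hcongr, ih]
      cases hc : pvChop xs with
      | none => simp
      | some ab => obtain ⟨a, b⟩ := ab; simp

-- PySem.Chars.splitlines.go returns [] only from the all-empty state
theorem pvGo_eq_nil (nl : Char → Bool) (l cur : List Char) (acc : List (List Char))
    (h : PySem.Chars.splitlines.go nl l cur acc = []) : l = [] ∧ cur = [] ∧ acc = [] := by
  induction l, cur, acc using PySem.Chars.splitlines.go.induct nl with
  | case1 cur acc hc =>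
    rw [PySem.Chars.splitlines.go] at h; simp [hc] at h; simp_all [List.isEmpty_iff]
  | case2 cur acc hc =>
    rw [PySem.Chars.splitlines.go] at h; simp [hc] at h
  | case3 rest cur acc ih =>
    rw [PySem.Chars.splitlines.go] at h; have := ih h; simp_all
  | case4 c rest cur acc hne hb ih =>
    rw [PySem.Chars.splitlines.go] at h
    split at h
    · have := ih h; simp_all
    · have := ih h; simp_all
    · exact hne
  | case5 c rest cur acc hne hb ih =>
    rw [PySem.Chars.splitlines.go] at h
    split at h
    · simp_all
    · have := ih h; simp_all
    · exact hne

-- splitlines returns [] only on the empty string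
theorem pvSplitlines_nil (s : String) (h : PySem.Str.splitlines s = []) : s = "" := by
  have h2 : (PySem.Str.splitlines s).map String.toList = [] := by rw [h]; rfl
  rw [PySem.Str.splitlines_map_toList] at h2
  have h3 : s.toList = [] := (pvGo_eq_nil _ _ _ _ h2).1
  have := congrArg String.ofList h3
  simpa using this

-- the two program bodies agree for any s and lines = splitlines s with (lines = [] → s = "")
theorem pvMain (s : String) (lines : List String) (hnil : lines = [] → s = "") :
    (if lines.length = 0 then ""
     else if PySem.Str.startswith (PySem.Str.strip ((PySem.List.pyGet? lines (-1)).getD "")) "print" then s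
     else
       match pvAScan lines (PySem.List.pyRange ((lines.length : Int) - 1) (-1) (-1)) with
       | some r => r
       | none => s) =
    (match lines.foldl pvBStep (none, []) with
     | (none, _) => s
     | (some _, []) => s
     | (some kept, _ :: _) => PySem.Str.join "\n" kept) := by
  by_cases hn : lines = []
  · subst hn; simp [hnil rfl]
  · have hlen : lines.length ≠ 0 := by simpa using hn
    rw [if_neg hlen, pvFoldB]
    have hr : PySem.List.pyRange ((lines.length : Int) - 1) (-1) (-1)
        = (PySem.List.pyRange 0 (lines.length : Int) 1).reverse := by
      rw [PySem.List.pyRange_neg_one_eq_reverse]; norm_num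
    rw [pvAScan_eq_find, hr, pvFind_chop]
    cases hc : pvChop lines with
    | none =>
      have hlast : pvPredL ((PySem.List.pyGet? lines (-1)).getD "") = false := by
        rw [PySem.List.pyGet?_neg_one, List.getLast?_eq_some_getLast hn, Option.getD_some]
        exact pvChop_none hc _ (List.getLast_mem hn)
      rw [if_neg (by simpa [pvPredL] using hlast)]
      simp
    | some ab =>
      obtain ⟨a, b⟩ := ab
      obtain ⟨hsplit, ⟨a', al, rfl, hal⟩, hb⟩ := pvChop_some hc
      cases b with
      | nil =>
        have hlast : (PySem.List.pyGet? lines (-1)).getD "" = al := by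
          rw [PySem.List.pyGet?_neg_one, hsplit]
          simp
        rw [if_pos (by rw [hlast]; simpa [pvPredL] using hal)]
      | cons c rest =>
        have hlast : (PySem.List.pyGet? lines (-1)).getD "" = (c :: rest).getLast (by simp) := by
          rw [PySem.List.pyGet?_neg_one, hsplit, List.getLast?_append,
            List.getLast?_eq_some_getLast (l := c :: rest) (by simp)]
          rfl
        have hlastF : pvPredL ((PySem.List.pyGet? lines (-1)).getD "") = false := by
          rw [hlast]; exact hb _ (List.getLast_mem (by simp))
        rw [if_neg (by simpa [pvPredL] using hlastF)]
        have hslice : PySem.List.slice lines none (some (((a' ++ [al]).length : Int) - 1 + 1))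
            = a' ++ [al] := by
          rw [show ((a' ++ [al]).length : Int) - 1 + 1 = ((a' ++ [al]).length : Int) by ring,
            PySem.List.slice_to _ (by positivity), hsplit, Int.toNat_natCast]
          exact List.take_left' rfl
        simp only [Option.map_some, hslice]
        simp

-- ===== VERDICT (by name: the statement is the Claim_ definition above) =====
theorem truncate_after_last_print_spec : Claim_equal_truncate_after_last_print := by
  intro code_str _
  unfold Spec_truncate_after_last_print truncate_after_last_print truncate_after_last_print_alt
  exact pvMain (PySem.Str.strip code_str) (PySem.Str.splitlines (PySem.Str.strip code_str))
    (fun h => pvSplitlines_nil _ h)
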